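-- pv_equiv track=rewrite | github.com/ildar-coder/SkillBox_python_basic | Module16/06_roller_skates/main.py | max_people_with_skates
-- ===== SOURCE A (Python) =====
-- def max_people_with_skates(skate_sizes, person_sizes):
--     people_count = 0
--     for skate_size in skate_sizes:
--         for person_size in person_sizes:
--             if skate_size == person_size:
--                 people_count += 1
--                 person_sizes.remove(person_size)
--                 break
--     return people_count
-- ===== SOURCE B (Python) =====
-- def max_people_with_skates(skate_sizes, person_sizes):
--     counts = {}
--     for s in skate_sizes:
--         counts[s] = counts.get(s, 0) + 1
--     people_count = 0
--     kept = []
--     for p in person_sizes: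
--         if counts.get(p, 0) > 0:
--             counts[p] = counts[p] - 1
--             people_count += 1
--         else:
--             kept.append(p)
--     person_sizes[:] = kept
--     return people_count
-- ===== Notes on version B (the rewrite author's own statement) =====
-- stated objective: faster
-- what changed: Replaced the nested scan (for each skate, linear search-and-remove in person_sizes) by a size-count dictionary built once over skate_sizes plus a single pass over person_sizes, reproducing the same in-place removal of matched persons via slice assignment.
import Mathlib
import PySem

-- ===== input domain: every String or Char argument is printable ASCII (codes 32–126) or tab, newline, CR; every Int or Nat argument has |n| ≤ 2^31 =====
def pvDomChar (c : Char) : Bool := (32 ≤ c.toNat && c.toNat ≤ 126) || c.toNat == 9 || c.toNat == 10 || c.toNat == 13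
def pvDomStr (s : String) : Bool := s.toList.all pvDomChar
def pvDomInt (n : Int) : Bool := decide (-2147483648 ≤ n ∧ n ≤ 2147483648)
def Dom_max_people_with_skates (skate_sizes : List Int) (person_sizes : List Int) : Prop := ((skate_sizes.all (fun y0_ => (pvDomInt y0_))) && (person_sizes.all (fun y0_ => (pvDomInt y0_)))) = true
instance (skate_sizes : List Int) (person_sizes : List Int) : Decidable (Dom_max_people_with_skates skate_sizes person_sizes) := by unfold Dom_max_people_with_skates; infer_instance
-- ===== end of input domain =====

-- B replaces A's nested scans by a skate-size count dictionary plus one pass over person_sizes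
-- (asymptotically faster); both Pythons remove matched persons from person_sizes in place, and
-- the equivalence proved here is about the RETURN value.

-- ===== PORT A =====
-- inner loop of A: scan persons for the first one equal to skate_size; on a match the matched
-- person (the first occurrence) is removed ('persons.remove(person_size); break'); none = no match
def pvInnerA (s : Int) : List Int → Option (List Int)
  | [] => none
  | p :: rest => if s = p then some rest else (pvInnerA s rest).map (p :: ·)

def pvGoA : List Int → List Int → Int → Int
  | [], _, cnt => cnt
  | s :: ss, ps, cnt =>
    match pvInnerA s ps with
    | some ps' => pvGoA ss ps' (cnt + 1)
    | none => pvGoA ss ps cnt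

def max_people_with_skates (skate_sizes : List Int) (person_sizes : List Int) : Int :=
  pvGoA skate_sizes person_sizes 0

-- ===== PORT B =====
-- second loop of B: one pass over person_sizes consuming the counter
def pvGoB : PySem.Dict Int Int → List Int → Int → List Int → Int
  | _, [], cnt, _ => cnt
  | c, p :: rest, cnt, kept =>
    if c.getD p 0 > 0 then pvGoB (c.insert p (c.getD p 0 - 1)) rest (cnt + 1) kept
    else pvGoB c rest cnt (kept ++ [p])

def max_people_with_skates_alt (skate_sizes : List Int) (person_sizes : List Int) : Int :=
  pvGoB (skate_sizes.foldl (fun d s => d.insert s (d.getD s 0 + 1)) PySem.Dict.empty)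
    person_sizes 0 []

-- ===== PRECONDITION & SPEC =====
def Spec_max_people_with_skates (skate_sizes : List Int) (person_sizes : List Int) (out : Int) : Prop := out = max_people_with_skates_alt skate_sizes person_sizes
instance (skate_sizes : List Int) (person_sizes : List Int) (out : Int) : Decidable (Spec_max_people_with_skates skate_sizes person_sizes out) := by unfold Spec_max_people_with_skates; infer_instance

-- ===== CLAIM (what is proved, stated in full; the proofs are below) =====
def Claim_equal_max_people_with_skates : Prop := ∀ (skate_sizes : List Int) (person_sizes : List Int), Dom_max_people_with_skates skate_sizes person_sizes → Spec_max_people_with_skates skate_sizes person_sizes (max_people_with_skates skate_sizes person_sizes)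

-- ===== LEMMAS AND PROOFS =====

-- A's inner scan finds the first match and removes it: it is erase (or none when absent)
theorem pvInnerA_eq (s : Int) (ps : List Int) :
    pvInnerA s ps = if s ∈ ps then some (ps.erase s) else none := by
  induction ps with
  | nil => simp [pvInnerA]
  | cons p rest ih =>
    by_cases h : s = p
    · subst h; simp [pvInnerA, List.erase_cons_head]
    · simp [pvInnerA, h, ih, Ne.symm h, List.mem_cons]

-- A's loop counts the cardinality of the multiset intersection
theorem pvGoA_eq (ss : List Int) : ∀ (ps : List Int) (cnt : Int),
    pvGoA ss ps cnt = cnt + (((ss : Multiset Int)) ∩ (ps : Multiset Int)).card := by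
  induction ss with
  | nil => intro ps cnt; simp [pvGoA]
  | cons s ss ih =>
    intro ps cnt
    by_cases h : s ∈ ps
    · have hm : s ∈ (ps : Multiset Int) := by simpa using h
      rw [show ((s :: ss : List Int) : Multiset Int) = s ::ₘ (ss : Multiset Int) from rfl,
        Multiset.cons_inter_of_pos _ hm]
      simp only [pvGoA, pvInnerA_eq, if_pos h]
      rw [ih, Multiset.card_cons]
      rw [show ((ps.erase s : List Int) : Multiset Int) = ((ps : Multiset Int)).erase s from
        (Multiset.coe_erase ps s).symm]
      push_cast; ring
    · have hm : s ∉ (ps : Multiset Int) := by simpa using h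
      rw [show ((s :: ss : List Int) : Multiset Int) = s ::ₘ (ss : Multiset Int) from rfl,
        Multiset.cons_inter_of_neg _ hm]
      simp only [pvGoA, pvInnerA_eq, if_neg h]
      exact ih ps cnt

-- B's loop, run with a counter representing multiset M, counts (persons ∩ M).card
theorem pvGoB_eq : ∀ (ps : List Int) (c : PySem.Dict Int Int) (cnt : Int) (kept : List Int)
    (M : Multiset Int), (∀ x, c.getD x 0 = (M.count x : Int)) →
    pvGoB c ps cnt kept = cnt + (((ps : Multiset Int)) ∩ M).card := by
  intro ps
  induction ps with
  | nil => intro c cnt kept M _; simp [pvGoB]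
  | cons p rest ih =>
    intro c cnt kept M hinv
    by_cases h : p ∈ M
    · have hpos : c.getD p 0 > 0 := by
        rw [hinv p]; exact_mod_cast Multiset.count_pos.mpr h
      have hcons : ((p :: rest : List Int) : Multiset Int) ∩ M
          = p ::ₘ ((rest : Multiset Int) ∩ M.erase p) := by
        rw [← Multiset.cons_coe]; exact Multiset.cons_inter_of_pos _ h
      simp only [pvGoB, if_pos hpos]
      rw [ih _ _ _ (M.erase p) ?_, hcons, Multiset.card_cons]
      · push_cast; ring
      · intro x
        rw [PySem.Dict.getD_insert]
        by_cases hx : x = p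
        · subst hx
          rw [if_pos rfl, Multiset.count_erase_self, hinv x]
          have : 1 ≤ M.count x := Multiset.one_le_count_iff_mem.mpr h
          omega
        · rw [if_neg hx, Multiset.count_erase_of_ne hx, hinv x]
    · have hzero : ¬ c.getD p 0 > 0 := by
        rw [hinv p, Multiset.count_eq_zero_of_notMem h]; simp
      have hcons : ((p :: rest : List Int) : Multiset Int) ∩ M = ((rest : Multiset Int)) ∩ M := by
        rw [← Multiset.cons_coe]; exact Multiset.cons_inter_of_neg _ h
      simp only [pvGoB, if_neg hzero]
      rw [ih _ _ _ M hinv, hcons]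

-- the counter built by B's first loop represents the multiset of skate sizes
theorem pvCounter_inv (ss : List Int) (x : Int) :
    ((ss.foldl (fun d s => d.insert s (d.getD s 0 + 1)) PySem.Dict.empty).getD x 0)
      = (((ss : Multiset Int)).count x : Int) := by
  rw [PySem.Dict.getD_foldl_insert_add_one, PySem.Dict.getD_empty]
  simp [Multiset.coe_count]

-- ===== VERDICT (by name: the statement is the Claim_ definition above) =====
theorem max_people_with_skates_spec : Claim_equal_max_people_with_skates := by
  intro ss ps _
  unfold Spec_max_people_with_skates max_people_with_skates max_people_with_skates_alt
  rw [pvGoA_eq, pvGoB_eq ps _ 0 [] (ss : Multiset Int) (pvCounter_inv ss),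
    Multiset.inter_comm]
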